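-- pv_equiv track=rewrite | github.com/anandprakash-web/kiwimath | backend/app/services/svg_generators.py | tally_marks
-- ===== SOURCE A (Python) =====
-- from typing import Any, Callable, Dict, List, Optional
--
-- def _safe_int(val: Any, default: int = 0) -> int:
--     """Coerce a value to int, handling template strings gracefully."""
--     if val is None:
--         return default
--     try:
--         return int(val)
--     except (ValueError, TypeError):
--         return default
--
-- def tally_marks(params: Dict[str, Any]) -> str:
--     """
--     Render tally marks. Groups of 5 (4 vertical + 1 diagonal), then singles.
--
--     Params:
--         count: int — number of tally marks
--     """
--     n = _safe_int(params.get("count"), 5)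
--     n = max(1, min(20, n))
--
--     groups = n // 5
--     singles = n % 5
--     total_slots = groups + (1 if singles > 0 else 0)
--
--     group_w = 60
--     pad = 12
--     width = total_slots * group_w + 2 * pad
--     height = 80
--     base_y = 15
--     mark_h = 50
--
--     parts = [
--         f'<svg xmlns="http://www.w3.org/2000/svg" viewBox="0 0 {width} {height}" '
--         f'role="img" aria-label="{n} tally marks">',
--     ]
--
--     slot = 0
--     # Full groups of 5.
--     for _ in range(groups):
--         gx = pad + slot * group_w
--         for j in range(4):
--             x = gx + j * 12 + 6
--             parts.append(
--                 f'<line x1="{x}" y1="{base_y}" x2="{x}" y2="{base_y + mark_h}" '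
--                 f'stroke="#333" stroke-width="3" stroke-linecap="round"/>'
--             )
--         # Diagonal strike-through.
--         parts.append(
--             f'<line x1="{gx}" y1="{base_y + mark_h - 8}" '
--             f'x2="{gx + 46}" y2="{base_y + 8}" '
--             f'stroke="#333" stroke-width="3" stroke-linecap="round"/>'
--         )
--         slot += 1
--
--     # Remaining singles.
--     if singles > 0:
--         gx = pad + slot * group_w
--         for j in range(singles):
--             x = gx + j * 12 + 6
--             parts.append(
--                 f'<line x1="{x}" y1="{base_y}" x2="{x}" y2="{base_y + mark_h}" '
--                 f'stroke="#333" stroke-width="3" stroke-linecap="round"/>'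
--             )
--
--     parts.append("</svg>")
--     return "".join(parts)
-- ===== SOURCE B (Python) =====
-- def tally_marks(params):
--     # One flat loop over mark index i: group = i // 5 gives the slot, i % 5 the
--     # position (0..3 vertical, 4 diagonal strike-through).
--     n = params.get("count")
--     n = 5 if n is None else int(n)
--     n = min(20, max(1, n))
--     groups = n // 5
--     singles = n % 5
--     total_slots = groups + (1 if singles > 0 else 0)
--     width = total_slots * 60 + 24
--     parts = [
--         f'<svg xmlns="http://www.w3.org/2000/svg" viewBox="0 0 {width} 80" '
--         f'role="img" aria-label="{n} tally marks">'
--     ]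
--     for i in range(n):
--         g = i // 5
--         pos = i % 5
--         gx = 12 + g * 60
--         if pos < 4:
--             x = gx + pos * 12 + 6
--             parts.append(
--                 f'<line x1="{x}" y1="15" x2="{x}" y2="65" '
--                 f'stroke="#333" stroke-width="3" stroke-linecap="round"/>'
--             )
--         else:
--             parts.append(
--                 f'<line x1="{gx}" y1="57" x2="{gx + 46}" y2="23" '
--                 f'stroke="#333" stroke-width="3" stroke-linecap="round"/>'
--             )
--     parts.append("</svg>")
--     return "".join(parts)
-- ===== Notes on version B (the rewrite author's own statement) =====
-- stated objective: alternative
-- what changed: Replaces the nested group loop plus separate singles loop by one flat loop over the mark index i, deriving the slot as i//5 and choosing vertical vs diagonal from i%5.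
import Mathlib
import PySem

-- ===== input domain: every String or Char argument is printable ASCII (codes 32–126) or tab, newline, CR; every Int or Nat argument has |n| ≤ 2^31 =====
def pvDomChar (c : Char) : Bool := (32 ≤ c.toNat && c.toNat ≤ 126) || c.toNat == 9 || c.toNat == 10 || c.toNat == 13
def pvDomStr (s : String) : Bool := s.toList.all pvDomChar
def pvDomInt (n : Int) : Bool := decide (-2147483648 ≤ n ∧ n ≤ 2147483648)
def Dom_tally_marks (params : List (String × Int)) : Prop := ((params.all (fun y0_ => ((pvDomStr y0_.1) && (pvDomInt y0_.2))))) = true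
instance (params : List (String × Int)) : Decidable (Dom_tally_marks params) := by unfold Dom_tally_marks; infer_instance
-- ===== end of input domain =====

-- B replaces A's nested group loop plus separate singles loop by one flat loop over
-- mark index i with i//5 as slot and i%5 choosing vertical vs diagonal (alternative decomposition).


-- ===== PORT A =====
-- f-string pieces of A, spelled out with PySem.Int.toStr (exact for str(int)).
def pvA_header (width height n : Int) : String :=
  "<svg xmlns=\"http://www.w3.org/2000/svg\" viewBox=\"0 0 " ++ PySem.Int.toStr width ++ " "
    ++ PySem.Int.toStr height ++ "\" role=\"img\" aria-label=\"" ++ PySem.Int.toStr n ++ " tally marks\">"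

def pvA_vline (x base_y mark_h : Int) : String :=
  "<line x1=\"" ++ PySem.Int.toStr x ++ "\" y1=\"" ++ PySem.Int.toStr base_y ++ "\" x2=\""
    ++ PySem.Int.toStr x ++ "\" y2=\"" ++ PySem.Int.toStr (base_y + mark_h)
    ++ "\" stroke=\"#333\" stroke-width=\"3\" stroke-linecap=\"round\"/>"

def pvA_diag (gx base_y mark_h : Int) : String :=
  "<line x1=\"" ++ PySem.Int.toStr gx ++ "\" y1=\"" ++ PySem.Int.toStr (base_y + mark_h - 8)
    ++ "\" x2=\"" ++ PySem.Int.toStr (gx + 46) ++ "\" y2=\"" ++ PySem.Int.toStr (base_y + 8)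
    ++ "\" stroke=\"#333\" stroke-width=\"3\" stroke-linecap=\"round\"/>"

-- body of A after n = max(1, min(20, _safe_int(params.get("count"), 5)))
def pvA_render (n : Int) : String :=
  let groups := PySem.Int.floordiv n 5
  let singles := PySem.Int.mod n 5
  let total_slots := groups + (if singles > 0 then (1 : Int) else 0)
  let group_w : Int := 60
  let pad : Int := 12
  let width := total_slots * group_w + 2 * pad
  let height : Int := 80
  let base_y : Int := 15
  let mark_h : Int := 50
  let parts : List String := [pvA_header width height n]
  let st := (PySem.List.pyRange 0 groups 1).foldl
    (fun (st : List String × Int) _ =>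
      let gx := pad + st.2 * group_w
      let parts := (PySem.List.pyRange 0 4 1).foldl
        (fun parts j => parts ++ [pvA_vline (gx + j * 12 + 6) base_y mark_h]) st.1
      (parts ++ [pvA_diag gx base_y mark_h], st.2 + 1))
    (parts, (0 : Int))
  let parts :=
    if singles > 0 then
      let gx := pad + st.2 * group_w
      (PySem.List.pyRange 0 singles 1).foldl
        (fun parts j => parts ++ [pvA_vline (gx + j * 12 + 6) base_y mark_h]) st.1
    else st.1
  String.join (parts ++ ["</svg>"])

def tally_marks (params : List (String × Int)) : String :=
  -- params.get("count") on the association list = first match; _safe_int(v, 5) = v for an Int, 5 for None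
  let n := max 1 (min 20 (((params.lookup "count").getD 5)))
  pvA_render n

-- ===== PORT B =====
def pvB_vline (x : Int) : String :=
  "<line x1=\"" ++ PySem.Int.toStr x ++ "\" y1=\"15\" x2=\"" ++ PySem.Int.toStr x
    ++ "\" y2=\"65\" stroke=\"#333\" stroke-width=\"3\" stroke-linecap=\"round\"/>"

def pvB_diag (gx : Int) : String :=
  "<line x1=\"" ++ PySem.Int.toStr gx ++ "\" y1=\"57\" x2=\"" ++ PySem.Int.toStr (gx + 46)
    ++ "\" y2=\"23\" stroke=\"#333\" stroke-width=\"3\" stroke-linecap=\"round\"/>"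

-- body of B after the clamp: one flat loop over i in range(n)
def pvB_render (n : Int) : String :=
  let groups := PySem.Int.floordiv n 5
  let singles := PySem.Int.mod n 5
  let total_slots := groups + (if singles > 0 then (1 : Int) else 0)
  let width := total_slots * 60 + 24
  let parts : List String :=
    ["<svg xmlns=\"http://www.w3.org/2000/svg\" viewBox=\"0 0 " ++ PySem.Int.toStr width
      ++ " 80\" role=\"img\" aria-label=\"" ++ PySem.Int.toStr n ++ " tally marks\">"]
  let parts := (PySem.List.pyRange 0 n 1).foldl
    (fun parts i =>
      let g := PySem.Int.floordiv i 5
      let pos := PySem.Int.mod i 5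
      let gx := 12 + g * 60
      if pos < 4 then parts ++ [pvB_vline (gx + pos * 12 + 6)]
      else parts ++ [pvB_diag gx])
    parts
  String.join (parts ++ ["</svg>"])

def tally_marks_alt (params : List (String × Int)) : String :=
  let n := max 1 (min 20 (((params.lookup "count").getD 5)))
  pvB_render n

-- ===== PRECONDITION & SPEC =====
def Spec_tally_marks (params : List (String × Int)) (out : String) : Prop := out = tally_marks_alt params
instance (params : List (String × Int)) (out : String) : Decidable (Spec_tally_marks params out) := by unfold Spec_tally_marks; infer_instance

-- ===== CLAIM (what is proved, stated in full; the proofs are below) =====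
def Claim_equal_tally_marks : Prop := ∀ (params : List (String × Int)), Dom_tally_marks params → Spec_tally_marks params (tally_marks params)

-- ===== LEMMAS AND PROOFS =====
set_option maxRecDepth 10000 in
theorem pv_render_eq (n : Int) (h1 : 1 ≤ n) (h2 : n ≤ 20) : pvA_render n = pvB_render n := by
  interval_cases n <;> rfl

-- ===== VERDICT (by name: the statement is the Claim_ definition above) =====
theorem tally_marks_spec : Claim_equal_tally_marks := by
  intro params _
  unfold Spec_tally_marks tally_marks tally_marks_alt
  exact pv_render_eq _ (by omega) (by omega)
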